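-- pv_equiv track=rewrite | github.com/Petra313/bioinf | Ch1/ba1l.py | pat_to_text
-- ===== SOURCE A (Python) =====
-- def pat_to_text(k,pattern):
--     count=0
--     c=0
--     for i in pattern:
--         if i=='A':
--             c=0
--         elif i=='C':
--             c=1
--         elif i=='G':
--             c=2
--         else:
--             c=3
--         count=count*4+c
--     return count
-- ===== SOURCE B (Python) =====
-- def pat_to_text(k, pattern):
--     count = 0
--     weight = 1
--     for i in reversed(pattern):
--         if i == 'A':
--             c = 0
--         elif i == 'C':
--             c = 1
--         elif i == 'G':
--             c = 2
--         else:
--             c = 3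
--         count += c * weight
--         weight *= 4
--     return count
-- ===== Notes on version B (the rewrite author's own statement) =====
-- stated objective: alternative
-- what changed: Replaces the left-to-right Horner accumulation count=count*4+c with a reverse pass that sums digit*weight while maintaining a power-of-4 weight.
import Mathlib
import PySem

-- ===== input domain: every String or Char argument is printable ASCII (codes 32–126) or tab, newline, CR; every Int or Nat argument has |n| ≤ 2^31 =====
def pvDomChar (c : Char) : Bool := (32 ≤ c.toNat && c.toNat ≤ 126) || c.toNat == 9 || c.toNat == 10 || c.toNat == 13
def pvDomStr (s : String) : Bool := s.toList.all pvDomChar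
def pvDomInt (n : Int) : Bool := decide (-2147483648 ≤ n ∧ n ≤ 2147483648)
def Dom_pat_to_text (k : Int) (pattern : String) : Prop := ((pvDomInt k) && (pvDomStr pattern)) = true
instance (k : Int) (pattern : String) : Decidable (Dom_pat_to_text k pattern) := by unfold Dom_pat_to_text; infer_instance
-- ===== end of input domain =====

-- B replaces A's Horner accumulation with a reverse pass summing digit * (power-of-4 weight); same cost, different decomposition.

-- ===== PORT A =====
-- the if/elif/else chain mapping a character to its digit (shared shape in both programs)
def pvDigit (i : Char) : Int :=
  if i = 'A' then 0
  else if i = 'C' then 1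
  else if i = 'G' then 2
  else 3

def pat_to_text (k : Int) (pattern : String) : Int :=
  -- for i in pattern: count = count*4 + c   (c from the if/elif chain)
  pattern.toList.foldl (fun count i => count * 4 + pvDigit i) 0

-- ===== PORT B =====
def pat_to_text_alt (k : Int) (pattern : String) : Int :=
  -- for i in reversed(pattern): count += c*weight; weight *= 4
  (pattern.toList.reverse.foldl
    (fun (st : Int × Int) i => (st.1 + pvDigit i * st.2, st.2 * 4)) (0, 1)).1

-- ===== PRECONDITION & SPEC =====
def Spec_pat_to_text (k : Int) (pattern : String) (out : Int) : Prop := out = pat_to_text_alt k pattern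
instance (k : Int) (pattern : String) (out : Int) : Decidable (Spec_pat_to_text k pattern out) := by unfold Spec_pat_to_text; infer_instance

-- ===== CLAIM (what is proved, stated in full; the proofs are below) =====
def Claim_equal_pat_to_text : Prop := ∀ (k : Int) (pattern : String), Dom_pat_to_text k pattern → Spec_pat_to_text k pattern (pat_to_text k pattern)

-- ===== LEMMAS AND PROOFS =====

-- little-endian value of a digit list
def pvLE : List Char → Int
  | [] => 0
  | x :: xs => pvDigit x + 4 * pvLE xs

theorem pvB_foldl (l : List Char) : ∀ (c w : Int),
    (l.foldl (fun (st : Int × Int) i => (st.1 + pvDigit i * st.2, st.2 * 4)) (c, w)).1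
      = c + w * pvLE l := by
  induction l with
  | nil => intro c w; simp [pvLE]
  | cons x xs ih =>
    intro c w
    simp only [List.foldl_cons, pvLE]
    rw [ih]
    ring

theorem pvLE_append (l : List Char) (x : Char) :
    pvLE (l ++ [x]) = pvLE l + 4 ^ l.length * pvDigit x := by
  induction l with
  | nil => simp [pvLE]
  | cons y ys ih => simp [pvLE, ih, pow_succ]; ring

theorem pvA_foldl (l : List Char) : ∀ (a : Int),
    l.foldl (fun count i => count * 4 + pvDigit i) a
      = a * 4 ^ l.length + pvLE l.reverse := by
  induction l with
  | nil => intro a; simp [pvLE]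
  | cons x xs ih =>
    intro a
    simp only [List.foldl_cons, List.reverse_cons]
    rw [ih, pvLE_append]
    simp [pow_succ]
    ring

-- ===== VERDICT (by name: the statement is the Claim_ definition above) =====
theorem pat_to_text_spec : Claim_equal_pat_to_text := by
  intro k pattern _
  unfold Spec_pat_to_text pat_to_text pat_to_text_alt
  rw [pvA_foldl, pvB_foldl]
  simp
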